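-- pv_equiv track=rewrite | github.com/0xNakah/Jsxray | core/js_discovery.py | _prioritize_pages
-- ===== SOURCE A (Python) =====
-- def _prioritize_pages(urls):
--     """Put parameterized and high-value pages first before applying caps."""
--     high, normal = [], []
--     keywords = ("search", "query", "redirect", "callback", "return", "api", "ajax", "graphql")
--     for url in urls:
--         lu = url.lower()
--         if "?" in url or any(k in lu for k in keywords):
--             high.append(url)
--         else:
--             normal.append(url)
--     return list(dict.fromkeys(high + normal))
-- ===== SOURCE B (Python) =====
-- def _prioritize_pages(urls):
--     """Put parameterized and high-value pages first before applying caps."""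
--     keywords = ("search", "query", "redirect", "callback", "return", "api", "ajax", "graphql")
--
--     def is_high(u):
--         lu = u.lower()
--         return "?" in u or any(k in lu for k in keywords)
--
--     unique = list(dict.fromkeys(urls))
--     return sorted(unique, key=lambda u: 0 if is_high(u) else 1)
-- ===== Notes on version B (the rewrite author's own statement) =====
-- stated objective: alternative
-- what changed: A partitions into two lists, concatenates and deduplicates last; B deduplicates first and then reorders the unique URLs with one stable sort on a binary priority key, evaluating the keyword predicate only once per unique URL.
import Mathlib
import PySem

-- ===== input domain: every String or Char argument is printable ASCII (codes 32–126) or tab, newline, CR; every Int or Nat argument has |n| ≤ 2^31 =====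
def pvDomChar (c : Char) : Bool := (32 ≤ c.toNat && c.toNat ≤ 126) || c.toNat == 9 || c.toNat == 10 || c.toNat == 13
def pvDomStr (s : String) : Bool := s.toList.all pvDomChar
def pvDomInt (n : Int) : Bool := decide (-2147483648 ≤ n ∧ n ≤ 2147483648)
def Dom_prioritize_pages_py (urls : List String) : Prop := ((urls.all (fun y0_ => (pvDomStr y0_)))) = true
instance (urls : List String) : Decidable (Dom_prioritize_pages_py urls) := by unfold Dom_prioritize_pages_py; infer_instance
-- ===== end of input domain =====

-- B deduplicates first and then reorders with one stable sort on a binary priority key (alternative decomposition, same cost).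


-- ===== PORT A =====
-- '"?" in url or any(k in url.lower() for k in keywords)' (shared by both ports)
def pvIsHigh (url : String) : Bool :=
  PySem.Str.isIn "?" url ||
  (["search", "query", "redirect", "callback", "return", "api", "ajax", "graphql"].any
    (fun k => PySem.Str.isIn k (PySem.Str.lower url)))

def prioritize_pages_py (urls : List String) : List String :=
  let hn := urls.foldl
    (fun (acc : List String × List String) url =>
      if pvIsHigh url then (acc.1 ++ [url], acc.2) else (acc.1, acc.2 ++ [url]))
    ([], [])
  PySem.List.dedup (hn.1 ++ hn.2)

-- ===== PORT B =====
def prioritize_pages_py_alt (urls : List String) : List String :=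
  PySem.List.sorted (PySem.List.dedup urls) (fun u => if pvIsHigh u then (0 : Int) else 1)

-- ===== PRECONDITION & SPEC =====
def Spec_prioritize_pages_py (urls : List String) (out : List String) : Prop := out = prioritize_pages_py_alt urls
instance (urls : List String) (out : List String) : Decidable (Spec_prioritize_pages_py urls out) := by unfold Spec_prioritize_pages_py; infer_instance

-- ===== CLAIM (what is proved, stated in full; the proofs are below) =====
def Claim_equal_prioritize_pages_py : Prop := ∀ (urls : List String), Dom_prioritize_pages_py urls → Spec_prioritize_pages_py urls (prioritize_pages_py urls)

-- ===== LEMMAS AND PROOFS =====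

-- A's loop is a partition: processed highs then lows, appended to the accumulators.
theorem pv_foldl_partition (p : String → Bool) (us : List String) (h n : List String) :
    us.foldl
      (fun (acc : List String × List String) url =>
        if p url then (acc.1 ++ [url], acc.2) else (acc.1, acc.2 ++ [url]))
      (h, n)
    = (h ++ us.filter p, n ++ us.filter (fun u => !p u)) := by
  induction us generalizing h n with
  | nil => simp
  | cons x xs ih =>
    by_cases hx : p x = true
    · simp [List.foldl_cons, hx, ih]
    · simp only [Bool.not_eq_true] at hx
      simp [List.foldl_cons, hx, ih]

-- Inserting a high element into highs ++ lows puts it after the highs.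
theorem pv_insert_high {α : Type} (p : α → Bool) (x : α) (A B : List α)
    (hA : ∀ a ∈ A, p a = true) (hB : ∀ b ∈ B, p b = false) (hx : p x = true) :
    PySem.List.insertBy
      (fun a b => decide ((if p a then (0 : Int) else 1) < (if p b then (0 : Int) else 1)))
      x (A ++ B) = A ++ x :: B := by
  induction A with
  | nil =>
    cases B with
    | nil => simp [PySem.List.insertBy]
    | cons b bs =>
      have hb := hB b (by simp)
      simp [PySem.List.insertBy, hx, hb]
  | cons a as ih =>
    have ha := hA a (by simp)
    have ih' := ih (fun a' ha' => hA a' (by simp [ha']))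
    simp [PySem.List.insertBy, hx, ha] at ih' ⊢
    exact ih'

-- Inserting a low element goes to the very end.
theorem pv_insert_low {α : Type} (p : α → Bool) (x : α) (ys : List α) (hx : p x = false) :
    PySem.List.insertBy
      (fun a b => decide ((if p a then (0 : Int) else 1) < (if p b then (0 : Int) else 1)))
      x ys = ys ++ [x] := by
  apply PySem.List.insertBy_of_forall_not_before
  intro y _
  simp [hx]
  split <;> omega

-- Invariant of the insertion-sort fold for a binary key.
theorem pv_foldl_insert (p : String → Bool) (ys : List String) (A B : List String)
    (hA : ∀ a ∈ A, p a = true) (hB : ∀ b ∈ B, p b = false) :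
    ys.foldl
      (fun acc x => PySem.List.insertBy
        (fun a b => decide ((if p a then (0 : Int) else 1) < (if p b then (0 : Int) else 1)))
        x acc)
      (A ++ B)
    = (A ++ ys.filter p) ++ (B ++ ys.filter (fun u => !p u)) := by
  induction ys generalizing A B with
  | nil => simp
  | cons x xs ih =>
    by_cases hx : p x = true
    · rw [List.foldl_cons, pv_insert_high p x A B hA hB hx]
      have hre : A ++ x :: B = (A ++ [x]) ++ B := by simp
      have hA' : ∀ a ∈ A ++ [x], p a = true := by
        intro a ha
        rcases List.mem_append.mp ha with h | h
        · exact hA a h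
        · simp at h; subst h; exact hx
      rw [hre, ih (A ++ [x]) B hA' hB]
      simp [hx]
    · simp only [Bool.not_eq_true] at hx
      rw [List.foldl_cons, pv_insert_low p x (A ++ B) hx]
      have hB' : ∀ b ∈ B ++ [x], p b = false := by
        intro b hb
        rcases List.mem_append.mp hb with h | h
        · exact hB b h
        · simp at h; subst h; exact hx
      rw [List.append_assoc, ih A (B ++ [x]) hA hB']
      simp [hx]

-- sorted with the binary key is exactly the stable partition.
theorem pv_sorted_partition (p : String → Bool) (ys : List String) :
    PySem.List.sorted ys (fun u => if p u then (0 : Int) else 1)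
    = ys.filter p ++ ys.filter (fun u => !p u) := by
  rw [PySem.List.sorted_eq_foldl_insertBy]
  have := pv_foldl_insert p ys [] [] (by simp) (by simp)
  simpa using this

-- dedup commutes with filter.
theorem pv_ofList_filter (p : String → Bool) (xs : List String) :
    PySem.Set.ofList (xs.filter p) = (PySem.Set.ofList xs).filter p := by
  induction xs with
  | nil => simp [PySem.Set.ofList]
  | cons x xs ih =>
    by_cases hx : p x = true
    · rw [List.filter_cons_of_pos hx, PySem.Set.ofList_cons, PySem.Set.ofList_cons, ih]
      simp only [PySem.Set.discard, List.filter_cons_of_pos hx]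
      rw [List.filter_filter, List.filter_filter]
      congr 1
      apply List.filter_congr
      intro y _
      simp [Bool.and_comm]
    · simp only [Bool.not_eq_true] at hx
      rw [List.filter_cons_of_neg (by simp [hx]), PySem.Set.ofList_cons, ih]
      simp only [PySem.Set.discard]
      rw [List.filter_cons_of_neg (show ¬ p x = true by simp [hx]), List.filter_filter]
      apply List.filter_congr
      intro y _
      by_cases hy : p y = true
      · have hne : (y == x) = false := by
          by_contra hc
          simp only [Bool.not_eq_false, beq_iff_eq] at hc
          subst hc; rw [hy] at hx; cases hx
        simp [hy, hne]
      · simp only [Bool.not_eq_true] at hy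
        simp [hy]

-- dedup distributes over an append of disjoint blocks.
theorem pv_ofList_append_disjoint (F N : List String)
    (hdisj : ∀ y ∈ N, y ∉ F) :
    PySem.Set.ofList (F ++ N) = PySem.Set.ofList F ++ PySem.Set.ofList N := by
  rw [PySem.Set.ofList_append, PySem.Set.update_eq_append_filter]
  congr 1
  apply List.filter_eq_self.mpr
  intro y hy
  have hyN : y ∈ N := (PySem.Set.mem_ofList N y).mp hy
  simp
  exact hdisj y hyN

-- ===== VERDICT (by name: the statement is the Claim_ definition above) =====
theorem prioritize_pages_py_spec : Claim_equal_prioritize_pages_py := by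
  intro urls _
  unfold Spec_prioritize_pages_py prioritize_pages_py prioritize_pages_py_alt
  rw [pv_foldl_partition pvIsHigh urls [] []]
  simp only [List.nil_append, PySem.List.dedup_eq_ofList]
  rw [pv_ofList_append_disjoint _ _
    (by intro y hy hyF
        have h1 := List.of_mem_filter hy
        have h2 := List.of_mem_filter hyF
        simp at h1; rw [h1] at h2; cases h2)]
  rw [pv_ofList_filter, pv_ofList_filter, pv_sorted_partition]
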